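-- pv_equiv track=rewrite | github.com/iralls/small_functions | floor_key.py | floor_key
-- ===== SOURCE A (Python) =====
-- def floor_key(d, m):
--     """
--     Find the nearest key (<=) in the dict
--
--     ex: v = {1: 'a', 5: 'b', 7: 'c'}
--     v[floor_key(v, 3)] == 'a'
--     v[floor_key(v, 6)] == 'b'
--     """
--
--     keys = sorted(d.keys())
--
--     for k, v in enumerate(keys):
--         if v <= m:
--             if len(keys) < k + 2:
--                 return v
--             if keys[k + 1] > m:
--                 return v
-- ===== SOURCE B (Python) =====
-- def floor_key(d, m):
--     """Largest key of d that is <= m (None if none): binary search on the sorted keys."""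
--     ks = sorted(d)
--     lo, hi = 0, len(ks)
--     while lo < hi:
--         mid = (lo + hi) // 2
--         if m < ks[mid]:
--             hi = mid
--         else:
--             lo = mid + 1
--     if lo:
--         return ks[lo - 1]
-- ===== Notes on version B (the rewrite author's own statement) =====
-- stated objective: alternative
-- what changed: replaces A's linear scan with lookahead over the sorted keys by a hand-written bisect_right binary search returning the key just before the insertion point of m
import Mathlib
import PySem

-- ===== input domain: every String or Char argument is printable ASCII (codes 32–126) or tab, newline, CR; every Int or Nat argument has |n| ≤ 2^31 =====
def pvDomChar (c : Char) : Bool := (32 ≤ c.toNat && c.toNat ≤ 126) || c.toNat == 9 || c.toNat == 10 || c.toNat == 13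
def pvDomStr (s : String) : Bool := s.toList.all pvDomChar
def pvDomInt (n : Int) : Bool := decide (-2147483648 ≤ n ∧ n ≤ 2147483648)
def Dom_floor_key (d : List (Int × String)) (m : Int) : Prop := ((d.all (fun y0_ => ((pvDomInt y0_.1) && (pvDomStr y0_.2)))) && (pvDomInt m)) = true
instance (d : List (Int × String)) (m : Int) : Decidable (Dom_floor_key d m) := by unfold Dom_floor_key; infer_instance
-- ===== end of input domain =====

-- B replaces A's linear scan (with lookahead) over the sorted keys by a bisect_right-style
-- binary search; same return value, similar overall cost (both sort first).


-- ===== PORT A =====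
-- the 'for k, v in enumerate(keys)' loop: k is the index counter, the list argument the
-- remaining suffix of keys; 'keys[k + 1]' is PySem.List.pyGet? (in range whenever it is
-- reached, guarded by the preceding length test, so the 'none' branch is unreachable)
def pvScanA (keys : List Int) (m : Int) (k : Nat) : List Int → Option Int
  | [] => none
  | v :: rest =>
    if v ≤ m then
      if keys.length < k + 2 then some v
      else
        match PySem.List.pyGet? keys ((k : Int) + 1) with
        | some nk => if m < nk then some v else pvScanA keys m (k + 1) rest
        | none => none
    else pvScanA keys m (k + 1) rest

-- sorted(d.keys()): the dict's keys are the first components, first occurrence kept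
def floor_key (d : List (Int × String)) (m : Int) : Option Int :=
  let keys := PySem.List.sorted (PySem.List.dedup (d.map (·.1))) (fun x => x) false
  pvScanA keys m 0 keys

-- ===== PORT B =====
-- the 'while lo < hi' binary-search loop of Source B; ks[mid] is always in range (lo ≤ mid < hi ≤ len)
def pvBisect (ks : List Int) (m : Int) (lo hi : Nat) : Nat :=
  if lo < hi then
    let mid := (lo + hi) / 2
    if m < ks.getD mid 0 then pvBisect ks m lo mid else pvBisect ks m (mid + 1) hi
  else lo
termination_by hi - lo
decreasing_by all_goals omega

def floor_key_alt (d : List (Int × String)) (m : Int) : Option Int :=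
  let ks := PySem.List.sorted (PySem.List.dedup (d.map (·.1))) (fun x => x) false
  let lo := pvBisect ks m 0 ks.length
  if lo ≠ 0 then PySem.List.pyGet? ks ((lo : Int) - 1) else none

-- ===== PRECONDITION & SPEC =====
def Spec_floor_key (d : List (Int × String)) (m : Int) (out : Option Int) : Prop := out = floor_key_alt d m
instance (d : List (Int × String)) (m : Int) (out : Option Int) : Decidable (Spec_floor_key d m out) := by unfold Spec_floor_key; infer_instance

-- ===== CLAIM (what is proved, stated in full; the proofs are below) =====
def Claim_equal_floor_key : Prop := ∀ (d : List (Int × String)) (m : Int), Dom_floor_key d m → Spec_floor_key d m (floor_key d m)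

-- ===== LEMMAS AND PROOFS =====

-- A's scan on a suffix of the (sorted) key list returns the last element ≤ m of that suffix
theorem pvScanA_eq (ks : List Int) (m : Int) :
    ∀ (rest : List Int) (k : Nat), ks.drop k = rest → rest.Pairwise (· ≤ ·) →
      pvScanA ks m k rest = (rest.takeWhile (fun v => decide (v ≤ m))).getLast? := by
  intro rest
  induction rest with
  | nil => intro k _ _; simp [pvScanA]
  | cons v rest ih =>
    intro k hdrop hp
    have hlen : ks.length = k + rest.length + 1 := by
      have := congrArg List.length hdrop
      simp [List.length_drop] at this
      by_cases hk : k ≤ ks.length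
      · omega
      · rw [List.drop_eq_nil_of_le (by omega)] at hdrop; simp at hdrop
    have hdrop' : ks.drop (k + 1) = rest := by
      have : ks.drop (k+1) = (ks.drop k).drop 1 := by rw [List.drop_drop]
      rw [this, hdrop]; rfl
    have hp' : rest.Pairwise (· ≤ ·) := hp.of_cons
    rw [pvScanA]
    by_cases hv : v ≤ m
    · simp only [if_pos hv]
      cases rest with
      | nil =>
        have hsmall : ks.length < k + 2 := by simp at hlen; omega
        simp only [if_pos hsmall]
        simp [List.takeWhile, hv]
      | cons w rest' =>
        simp only [if_neg (by simp at hlen ⊢; omega : ¬ ks.length < k + 2)]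
        have hw : ks[k+1]? = some w := by
          have h0 : (ks.drop (k+1))[0]? = some w := by rw [hdrop']; rfl
          rw [List.getElem?_drop] at h0
          simpa using h0
        have hget : PySem.List.pyGet? ks ((k : Int) + 1) = some w := by
          have : ((k : Int) + 1) = ((k + 1 : Nat) : Int) := by push_cast; ring
          rw [this, PySem.List.pyGet?_natCast, hw]
        rw [hget]
        by_cases hwm : m < w
        · simp only [if_pos hwm]
          have : ¬ (w ≤ m) := by omega
          simp [List.takeWhile, hv, this]
        · simp only [if_neg hwm]
          rw [ih (k+1) hdrop' hp']
          have hwle : w ≤ m := by omega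
          simp [List.takeWhile, hv, hwle, List.getLast?_cons_cons]
    · simp only [if_neg hv]
      rw [ih (k+1) hdrop' hp']
      have hall : ∀ w ∈ rest, ¬ (w ≤ m) := by
        intro w hw
        have := (List.pairwise_cons.mp hp).1 w hw
        omega
      have h1 : rest.takeWhile (fun v => decide (v ≤ m)) = [] := by
        cases rest with
        | nil => rfl
        | cons w r => simp [List.takeWhile, hall w (by simp)]
      have h2 : (v :: rest).takeWhile (fun v => decide (v ≤ m)) = [] := by
        simp [List.takeWhile, hv]
      rw [h1, h2]

-- takeWhile maximality: the element at the cut fails the predicate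
theorem takeWhile_cut {α : Type} (p : α → Bool) :
    ∀ (l : List α) (h : (l.takeWhile p).length < l.length),
      ¬ p (l[(l.takeWhile p).length]'h) := by
  intro l
  induction l with
  | nil => simp
  | cons x xs ih =>
    intro h
    by_cases hx : p x
    · simp [List.takeWhile, hx] at h ⊢
      simpa using ih (by omega)
    · simp [List.takeWhile, hx]

-- the split point: on a sorted list, the indices of elements ≤ m are exactly those below the
-- length of the ≤-m prefix
theorem takeWhile_split (ks : List Int) (m : Int) (hs : ks.Pairwise (· ≤ ·)) :
    ∀ i (h : i < ks.length), ks[i] ≤ m ↔ i < (ks.takeWhile (fun v => decide (v ≤ m))).length := by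
  intro i h
  set p := (ks.takeWhile (fun v => decide (v ≤ m))).length with hp
  have hple : p ≤ ks.length := by
    simpa [hp] using (List.takeWhile_prefix (fun v => decide (v ≤ m))).length_le
  have htake : ks.takeWhile (fun v => decide (v ≤ m)) = ks.take p := by
    have := List.takeWhile_prefix (l := ks) (p := fun v => decide (v ≤ m))
    exact List.prefix_iff_eq_take.mp this
  constructor
  · intro hle
    by_contra hnot
    have hpi : p ≤ i := by omega
    have hplen : p < ks.length := by omega
    have hfail : ¬ ((fun v => decide (v ≤ m)) (ks[p]'hplen)) := by
      have := takeWhile_cut (fun v => decide (v ≤ m)) ks (by omega)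
      simpa [hp] using this
    have hpm : ¬ (ks[p]'hplen ≤ m) := by simpa using hfail
    rcases Nat.lt_or_ge p i with hlt | hge
    · have := (List.pairwise_iff_getElem.mp hs) p i hplen h hlt
      omega
    · have : p = i := by omega
      subst this; omega
  · intro hlt
    have h2 : i < (ks.take p).length := by simp; omega
    have e : (ks.take p)[i]'h2 = ks[i]'h := by simp [List.getElem_take]
    have hmem : ks[i]'h ∈ ks.takeWhile (fun v => decide (v ≤ m)) := by
      rw [htake]; exact e ▸ List.getElem_mem h2
    simpa using List.mem_takeWhile_imp hmem

-- the binary search returns the split point p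
theorem pvBisect_eq (ks : List Int) (m : Int) (p : Nat)
    (h1 : ∀ i (h : i < ks.length), ks[i] ≤ m ↔ i < p) :
    ∀ n lo hi, hi - lo ≤ n → lo ≤ p → p ≤ hi → hi ≤ ks.length → pvBisect ks m lo hi = p := by
  intro n
  induction n with
  | zero =>
    intro lo hi hn hlo hhi hlen
    rw [pvBisect]
    simp only [if_neg (by omega : ¬ lo < hi)]
    omega
  | succ n ih =>
    intro lo hi hn hlo hhi hlen
    rw [pvBisect]
    by_cases hlt : lo < hi
    · simp only [if_pos hlt]
      have hmlen : (lo + hi) / 2 < ks.length := by omega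
      have hgd : ks.getD ((lo + hi) / 2) 0 = ks[(lo + hi) / 2]'hmlen := List.getD_eq_getElem ks 0 hmlen
      by_cases hc : m < ks.getD ((lo + hi) / 2) 0
      · simp only [if_pos hc]
        have : ¬ ((lo + hi) / 2 < p) := by
          rw [← h1 _ hmlen]; rw [hgd] at hc; omega
        exact ih lo ((lo + hi) / 2) (by omega) hlo (by omega) (by omega)
      · simp only [if_neg hc]
        have : (lo + hi) / 2 < p := by
          rw [← h1 _ hmlen]; rw [hgd] at hc; omega
        exact ih ((lo + hi) / 2 + 1) hi (by omega) (by omega) hhi hlen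
    · simp only [if_neg hlt]; omega

-- the last element ≤ m of the sorted list, read off at index p - 1
theorem getLast_takeWhile_eq (ks : List Int) (m : Int) (p : Nat)
    (hp : p = (ks.takeWhile (fun v => decide (v ≤ m))).length)
    (hple : p ≤ ks.length) (hpos : p ≠ 0) :
    (ks.takeWhile (fun v => decide (v ≤ m))).getLast? = PySem.List.pyGet? ks ((p : Int) - 1) := by
  have htake : ks.takeWhile (fun v => decide (v ≤ m)) = ks.take p := by
    rw [hp]; exact List.prefix_iff_eq_take.mp (List.takeWhile_prefix _)
  have hcast : ((p : Int) - 1) = ((p - 1 : Nat) : Int) := by omega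
  rw [hcast, PySem.List.pyGet?_natCast]
  rw [List.getLast?_eq_getElem?, htake]
  simp [List.getElem?_take]
  rw [Nat.min_eq_left hple, if_pos (by omega)]

-- ===== VERDICT (by name: the statement is the Claim_ definition above) =====
theorem floor_key_spec : Claim_equal_floor_key := by
  intro d m _
  unfold Spec_floor_key
  set ks := PySem.List.sorted (PySem.List.dedup (d.map (·.1))) (fun x => x) false with hks
  have hlt : ks.Pairwise (· < ·) := by
    rw [hks, PySem.List.dedup_eq_ofList (d.map (·.1))]
    exact PySem.List.sorted_ofList_pairwise_lt (d.map (·.1))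
  have hs : ks.Pairwise (· ≤ ·) := hlt.imp le_of_lt
  set p := (ks.takeWhile (fun v => decide (v ≤ m))).length with hp
  have hple : p ≤ ks.length := by
    simpa [hp] using (List.takeWhile_prefix (fun v => decide (v ≤ m))).length_le
  have hbis : pvBisect ks m 0 ks.length = p :=
    pvBisect_eq ks m p (takeWhile_split ks m hs) ks.length 0 ks.length (by omega) (by omega) hple le_rfl
  have hA : floor_key d m = pvScanA ks m 0 ks := rfl
  have hB : floor_key_alt d m =
      (if pvBisect ks m 0 ks.length ≠ 0 then
        PySem.List.pyGet? ks ((pvBisect ks m 0 ks.length : Int) - 1) else none) := rfl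
  rw [hA, hB, pvScanA_eq ks m ks 0 rfl hs, hbis]
  by_cases hpos : p ≠ 0
  · rw [if_pos hpos]
    exact getLast_takeWhile_eq ks m p hp hple hpos
  · simp at hpos
    rw [if_neg (by omega)]
    have : ks.takeWhile (fun v => decide (v ≤ m)) = [] := List.length_eq_zero_iff.mp (by omega)
    rw [this]; rfl
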